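-- pv_equiv track=rewrite | github.com/shivtchandra/HospitalStay-prediction-model | scripts/predict.py | map_diagnosis_to_category
-- ===== SOURCE A (Python) =====
-- def map_diagnosis_to_category(diagnosis):
--     """Maps a detailed diagnosis string to a high-level category."""
--     if not isinstance(diagnosis, str):
--         return 'Other'
--     diagnosis = diagnosis.lower()
--     if any(term in diagnosis for term in ['sepsis', 'septicemia', 'bacteremia', 'infection', 'pneumonia']):
--         return 'Infection'
--     if any(term in diagnosis for term in ['failure', 'infarction', 'atrial fibrillation', 'hypertension', 'cardiac']):
--         return 'Cardiovascular'
--     if any(term in diagnosis for term in ['respiratory', 'copd', 'asthma', 'embolism']):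
--         return 'Respiratory'
--     if any(term in diagnosis for term in ['fracture', 'dislocation', 'injury', 'trauma', 'hemorrhage']):
--         return 'Injury'
--     if any(term in diagnosis for term in ['cancer', 'carcinoma', 'leukemia', 'lymphoma', 'neoplasm']):
--         return 'Cancer'
--     return 'Other'
-- ===== SOURCE B (Python) =====
-- TERM_RANK = {
--     'sepsis': (0, 'Infection'), 'septicemia': (0, 'Infection'), 'bacteremia': (0, 'Infection'),
--     'infection': (0, 'Infection'), 'pneumonia': (0, 'Infection'),
--     'failure': (1, 'Cardiovascular'), 'infarction': (1, 'Cardiovascular'),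
--     'atrial fibrillation': (1, 'Cardiovascular'), 'hypertension': (1, 'Cardiovascular'),
--     'cardiac': (1, 'Cardiovascular'),
--     'respiratory': (2, 'Respiratory'), 'copd': (2, 'Respiratory'), 'asthma': (2, 'Respiratory'),
--     'embolism': (2, 'Respiratory'),
--     'fracture': (3, 'Injury'), 'dislocation': (3, 'Injury'), 'injury': (3, 'Injury'),
--     'trauma': (3, 'Injury'), 'hemorrhage': (3, 'Injury'),
--     'cancer': (4, 'Cancer'), 'carcinoma': (4, 'Cancer'), 'leukemia': (4, 'Cancer'),
--     'lymphoma': (4, 'Cancer'), 'neoplasm': (4, 'Cancer'),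
-- }
--
-- def map_diagnosis_to_category(diagnosis):
--     """Maps a detailed diagnosis string to a high-level category."""
--     if not isinstance(diagnosis, str):
--         return 'Other'
--     d = diagnosis.lower()
--     hits = [rank for term, rank in TERM_RANK.items() if term in d]
--     if not hits:
--         return 'Other'
--     return min(hits, key=lambda r: r[0])[1]
-- ===== Notes on version B (the rewrite author's own statement) =====
-- stated objective: alternative
-- what changed: Replaces A's ordered per-category if-branches (each an any() over that category's keyword list) by one flat keyword -> (priority, category) dictionary: B collects the ranks of all matching keywords in a single comprehension and returns the category of the minimum priority, so branch order becomes data (the priority numbers) and the selection is a min over matches instead of an early-return chain.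
import Mathlib
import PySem

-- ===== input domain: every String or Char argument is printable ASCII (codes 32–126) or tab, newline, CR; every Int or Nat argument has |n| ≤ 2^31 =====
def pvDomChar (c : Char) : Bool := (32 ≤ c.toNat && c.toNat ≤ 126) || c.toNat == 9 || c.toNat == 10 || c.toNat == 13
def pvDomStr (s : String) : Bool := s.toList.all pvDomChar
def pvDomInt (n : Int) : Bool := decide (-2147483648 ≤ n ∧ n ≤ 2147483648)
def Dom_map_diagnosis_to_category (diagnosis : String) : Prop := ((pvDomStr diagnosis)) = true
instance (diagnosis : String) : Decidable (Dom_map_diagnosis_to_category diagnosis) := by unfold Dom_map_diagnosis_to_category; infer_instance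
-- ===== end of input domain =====

-- B: one flat term → (priority, category) dictionary and a single min-over-matched-priorities,
-- instead of A's ordered per-category any-branches (objective: alternative).
-- ===== PORT A =====
def map_diagnosis_to_category (diagnosis : String) : String :=
  let d := PySem.Str.lower diagnosis
  if ["sepsis", "septicemia", "bacteremia", "infection", "pneumonia"].any (fun term => PySem.Str.isIn term d) then "Infection"
  else if ["failure", "infarction", "atrial fibrillation", "hypertension", "cardiac"].any (fun term => PySem.Str.isIn term d) then "Cardiovascular"
  else if ["respiratory", "copd", "asthma", "embolism"].any (fun term => PySem.Str.isIn term d) then "Respiratory"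
  else if ["fracture", "dislocation", "injury", "trauma", "hemorrhage"].any (fun term => PySem.Str.isIn term d) then "Injury"
  else if ["cancer", "carcinoma", "leukemia", "lymphoma", "neoplasm"].any (fun term => PySem.Str.isIn term d) then "Cancer"
  else "Other"

-- ===== PORT B =====
def pvTERM_RANK : List (String × Int × String) :=
  [("sepsis", 0, "Infection"), ("septicemia", 0, "Infection"), ("bacteremia", 0, "Infection"),
   ("infection", 0, "Infection"), ("pneumonia", 0, "Infection"),
   ("failure", 1, "Cardiovascular"), ("infarction", 1, "Cardiovascular"),
   ("atrial fibrillation", 1, "Cardiovascular"), ("hypertension", 1, "Cardiovascular"),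
   ("cardiac", 1, "Cardiovascular"),
   ("respiratory", 2, "Respiratory"), ("copd", 2, "Respiratory"), ("asthma", 2, "Respiratory"),
   ("embolism", 2, "Respiratory"),
   ("fracture", 3, "Injury"), ("dislocation", 3, "Injury"), ("injury", 3, "Injury"),
   ("trauma", 3, "Injury"), ("hemorrhage", 3, "Injury"),
   ("cancer", 4, "Cancer"), ("carcinoma", 4, "Cancer"), ("leukemia", 4, "Cancer"),
   ("lymphoma", 4, "Cancer"), ("neoplasm", 4, "Cancer")]

def map_diagnosis_to_category_alt (diagnosis : String) : String :=
  let d := PySem.Str.lower diagnosis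
  let hits := (pvTERM_RANK.filter (fun t => PySem.Str.isIn t.1 d)).map (fun t => t.2)
  match PySem.List.min? hits (fun r => r.1) with
  | none => "Other"
  | some r => r.2

-- ===== PRECONDITION & SPEC =====
def Spec_map_diagnosis_to_category (diagnosis : String) (out : String) : Prop := out = map_diagnosis_to_category_alt diagnosis
instance (diagnosis : String) (out : String) : Decidable (Spec_map_diagnosis_to_category diagnosis out) := by unfold Spec_map_diagnosis_to_category; infer_instance

-- ===== CLAIM (what is proved, stated in full; the proofs are below) =====
def Claim_equal_map_diagnosis_to_category : Prop := ∀ (diagnosis : String), Dom_map_diagnosis_to_category diagnosis → Spec_map_diagnosis_to_category diagnosis (map_diagnosis_to_category diagnosis)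

-- ===== LEMMAS AND PROOFS =====

-- the five priority groups of pvTERM_RANK
def pvG0 : List (String × Int × String) :=
  [("sepsis", 0, "Infection"), ("septicemia", 0, "Infection"), ("bacteremia", 0, "Infection"),
   ("infection", 0, "Infection"), ("pneumonia", 0, "Infection")]
def pvG1 : List (String × Int × String) :=
  [("failure", 1, "Cardiovascular"), ("infarction", 1, "Cardiovascular"),
   ("atrial fibrillation", 1, "Cardiovascular"), ("hypertension", 1, "Cardiovascular"),
   ("cardiac", 1, "Cardiovascular")]
def pvG2 : List (String × Int × String) :=
  [("respiratory", 2, "Respiratory"), ("copd", 2, "Respiratory"), ("asthma", 2, "Respiratory"),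
   ("embolism", 2, "Respiratory")]
def pvG3 : List (String × Int × String) :=
  [("fracture", 3, "Injury"), ("dislocation", 3, "Injury"), ("injury", 3, "Injury"),
   ("trauma", 3, "Injury"), ("hemorrhage", 3, "Injury")]
def pvG4 : List (String × Int × String) :=
  [("cancer", 4, "Cancer"), ("carcinoma", 4, "Cancer"), ("leukemia", 4, "Cancer"),
   ("lymphoma", 4, "Cancer"), ("neoplasm", 4, "Cancer")]

lemma pvTERM_split : pvTERM_RANK = pvG0 ++ (pvG1 ++ (pvG2 ++ (pvG3 ++ pvG4))) := rfl

-- foldl of min?'s step keeps an accumulator no later element beats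
lemma pv_foldl_min_keep {α : Type} (key : α → Int) (m : α) :
    ∀ (l : List α), (∀ x ∈ l, ¬ key x < key m) →
    List.foldl (fun acc x => match acc with
      | none => some x
      | some m' => if key x < key m' then some x else some m') (some m) l = some m := by
  intro l
  induction l with
  | nil => intro _; rfl
  | cons y t ih =>
      intro h
      simp only [List.foldl]
      rw [if_neg (h y (by simp))]
      exact ih (fun z hz => h z (by simp [hz]))

lemma pv_min?_append_of_le {α : Type} (xs ys : List α) (key : α → Int) (m : α)
    (hm : PySem.List.min? xs key = some m) (h : ∀ y ∈ ys, key m ≤ key y) :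
    PySem.List.min? (xs ++ ys) key = some m := by
  unfold PySem.List.min? at *
  rw [List.foldl_append, hm]
  exact pv_foldl_min_keep key m ys (fun y hy => not_lt.2 (h y hy))

lemma pv_min?_const {α : Type} (key : α → Int) (c : α) (l : List α)
    (hall : ∀ x ∈ l, x = c) (hne : l ≠ []) : PySem.List.min? l key = some c := by
  cases l with
  | nil => exact absurd rfl hne
  | cons y t =>
      have hy : y = c := hall y (by simp)
      subst hy
      unfold PySem.List.min?
      simp only [List.foldl]
      exact pv_foldl_min_keep key y t (fun x hx => by
        rw [hall x (by simp [hx])]; exact lt_irrefl _)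

lemma pv_filter_map_eq_nil {α β : Type} (q : α → Bool) (f : α → β) (ts : List α)
    (h : ts.any q = false) : (ts.filter q).map f = [] := by
  have : ts.filter q = [] := List.filter_eq_nil_iff.2 (by
    intro a ha
    have := List.any_eq_false.1 h a ha
    simpa using this)
  simp [this]

lemma pv_filter_map_ne_nil {α β : Type} (q : α → Bool) (f : α → β) (ts : List α)
    (h : ts.any q = true) : (ts.filter q).map f ≠ [] := by
  rcases List.any_eq_true.1 h with ⟨a, ha, hq⟩
  intro hnil
  rw [List.map_eq_nil_iff] at hnil
  exact absurd (List.mem_filter.2 ⟨ha, hq⟩) (by simp [hnil])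

lemma pv_mem_filter_map {α β : Type} (q : α → Bool) (f : α → β) (ts : List α) (c : β)
    (hc : ∀ t ∈ ts, f t = c) : ∀ x ∈ (ts.filter q).map f, x = c := by
  intro x hx
  rcases List.mem_map.1 hx with ⟨t, ht, rfl⟩
  exact hc t (List.mem_filter.1 ht).1

-- ===== VERDICT (by name: the statement is the Claim_ definition above) =====
theorem map_diagnosis_to_category_spec : Claim_equal_map_diagnosis_to_category := by
  intro diagnosis _
  unfold Spec_map_diagnosis_to_category map_diagnosis_to_category map_diagnosis_to_category_alt
  simp only []
  set d := PySem.Str.lower diagnosis with hd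
  set q : String × Int × String → Bool := fun t => PySem.Str.isIn t.1 d with hq
  have hsplit : (pvTERM_RANK.filter q).map (fun t => t.2)
      = ((pvG0.filter q).map (fun t => t.2)) ++ (((pvG1.filter q).map (fun t => t.2))
        ++ (((pvG2.filter q).map (fun t => t.2)) ++ (((pvG3.filter q).map (fun t => t.2))
        ++ ((pvG4.filter q).map (fun t => t.2))))) := by
    rw [pvTERM_split]; simp [List.filter_append, List.map_append]
  have m0 : ∀ x ∈ (pvG0.filter q).map (fun t => t.2), x = (((0:Int), "Infection") : Int × String) :=
    pv_mem_filter_map q _ pvG0 _ (by decide)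
  have m1 : ∀ x ∈ (pvG1.filter q).map (fun t => t.2), x = (((1:Int), "Cardiovascular") : Int × String) :=
    pv_mem_filter_map q _ pvG1 _ (by decide)
  have m2 : ∀ x ∈ (pvG2.filter q).map (fun t => t.2), x = (((2:Int), "Respiratory") : Int × String) :=
    pv_mem_filter_map q _ pvG2 _ (by decide)
  have m3 : ∀ x ∈ (pvG3.filter q).map (fun t => t.2), x = (((3:Int), "Injury") : Int × String) :=
    pv_mem_filter_map q _ pvG3 _ (by decide)
  have m4 : ∀ x ∈ (pvG4.filter q).map (fun t => t.2), x = (((4:Int), "Cancer") : Int × String) :=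
    pv_mem_filter_map q _ pvG4 _ (by decide)
  have e0 : (["sepsis", "septicemia", "bacteremia", "infection", "pneumonia"].any (fun term => PySem.Str.isIn term d)) = pvG0.any q := by
    simp [pvG0, hq]
  have e1 : (["failure", "infarction", "atrial fibrillation", "hypertension", "cardiac"].any (fun term => PySem.Str.isIn term d)) = pvG1.any q := by
    simp [pvG1, hq]
  have e2 : (["respiratory", "copd", "asthma", "embolism"].any (fun term => PySem.Str.isIn term d)) = pvG2.any q := by
    simp [pvG2, hq]
  have e3 : (["fracture", "dislocation", "injury", "trauma", "hemorrhage"].any (fun term => PySem.Str.isIn term d)) = pvG3.any q := by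
    simp [pvG3, hq]
  have e4 : (["cancer", "carcinoma", "leukemia", "lymphoma", "neoplasm"].any (fun term => PySem.Str.isIn term d)) = pvG4.any q := by
    simp [pvG4, hq]
  rw [hsplit, e0, e1, e2, e3, e4]
  by_cases h0 : pvG0.any q = true
  · have hmin := pv_min?_const (fun r : Int × String => r.1) ((0:Int), "Infection") _ m0
      (pv_filter_map_ne_nil q _ pvG0 h0)
    have hb : ∀ y ∈ ((pvG1.filter q).map (fun t => t.2)) ++ (((pvG2.filter q).map (fun t => t.2))
        ++ (((pvG3.filter q).map (fun t => t.2)) ++ ((pvG4.filter q).map (fun t => t.2)))),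
        (((0:Int), "Infection") : Int × String).1 ≤ y.1 := by
      intro y hy
      simp only [List.mem_append] at hy
      rcases hy with h | h | h | h
      · rw [m1 y h]; norm_num
      · rw [m2 y h]; norm_num
      · rw [m3 y h]; norm_num
      · rw [m4 y h]; norm_num
    rw [pv_min?_append_of_le _ _ _ _ hmin hb, if_pos h0]
  · rw [Bool.not_eq_true] at h0
    rw [if_neg (by simp [h0]), pv_filter_map_eq_nil q _ pvG0 h0, List.nil_append]
    by_cases h1 : pvG1.any q = true
    · have hmin := pv_min?_const (fun r : Int × String => r.1) ((1:Int), "Cardiovascular") _ m1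
        (pv_filter_map_ne_nil q _ pvG1 h1)
      have hb : ∀ y ∈ ((pvG2.filter q).map (fun t => t.2))
          ++ (((pvG3.filter q).map (fun t => t.2)) ++ ((pvG4.filter q).map (fun t => t.2))),
          (((1:Int), "Cardiovascular") : Int × String).1 ≤ y.1 := by
        intro y hy
        simp only [List.mem_append] at hy
        rcases hy with h | h | h
        · rw [m2 y h]; norm_num
        · rw [m3 y h]; norm_num
        · rw [m4 y h]; norm_num
      rw [pv_min?_append_of_le _ _ _ _ hmin hb, if_pos h1]
    · rw [Bool.not_eq_true] at h1
      rw [if_neg (by simp [h1]), pv_filter_map_eq_nil q _ pvG1 h1, List.nil_append]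
      by_cases h2 : pvG2.any q = true
      · have hmin := pv_min?_const (fun r : Int × String => r.1) ((2:Int), "Respiratory") _ m2
          (pv_filter_map_ne_nil q _ pvG2 h2)
        have hb : ∀ y ∈ ((pvG3.filter q).map (fun t => t.2)) ++ ((pvG4.filter q).map (fun t => t.2)),
            (((2:Int), "Respiratory") : Int × String).1 ≤ y.1 := by
          intro y hy
          simp only [List.mem_append] at hy
          rcases hy with h | h
          · rw [m3 y h]; norm_num
          · rw [m4 y h]; norm_num
        rw [pv_min?_append_of_le _ _ _ _ hmin hb, if_pos h2]
      · rw [Bool.not_eq_true] at h2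
        rw [if_neg (by simp [h2]), pv_filter_map_eq_nil q _ pvG2 h2, List.nil_append]
        by_cases h3 : pvG3.any q = true
        · have hmin := pv_min?_const (fun r : Int × String => r.1) ((3:Int), "Injury") _ m3
            (pv_filter_map_ne_nil q _ pvG3 h3)
          have hb : ∀ y ∈ (pvG4.filter q).map (fun t => t.2),
              (((3:Int), "Injury") : Int × String).1 ≤ y.1 := by
            intro y hy
            rw [m4 y hy]; norm_num
          rw [pv_min?_append_of_le _ _ _ _ hmin hb, if_pos h3]
        · rw [Bool.not_eq_true] at h3
          rw [if_neg (by simp [h3]), pv_filter_map_eq_nil q _ pvG3 h3, List.nil_append]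
          by_cases h4 : pvG4.any q = true
          · have hmin := pv_min?_const (fun r : Int × String => r.1) ((4:Int), "Cancer") _ m4
              (pv_filter_map_ne_nil q _ pvG4 h4)
            rw [hmin, if_pos h4]
          · rw [Bool.not_eq_true] at h4
            rw [if_neg (by simp [h4]), pv_filter_map_eq_nil q _ pvG4 h4]
            rfl
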